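-- pv_equiv track=rewrite | github.com/openvinotoolkit/openvino | tests/e2e_oss/utils/test_utils.py | get_static_shape
-- ===== SOURCE A (Python) =====
-- import copy
--
-- def get_static_shape(default_shapes, changed_values, layout, dims_to_change):
--     static_shapes = copy.deepcopy(default_shapes)
--     static_shapes = {k: list(v) for k, v in static_shapes.items()}
--     for input_layer, dimension in dims_to_change.items():
--         if dimension is None:
--             continue
--         else:
--             dim_indexes = [layout[input_layer].index(d) for d in dimension]
--             for value_index, value in enumerate(dict(changed_values)[input_layer]):
--                 if value is None:
--                     static_shapes[input_layer][dim_indexes[value_index]] = \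
--                         default_shapes[input_layer][dim_indexes[value_index]]
--                 else:
--                     static_shapes[input_layer][dim_indexes[value_index]] = value
--     return static_shapes
-- ===== SOURCE B (Python) =====
-- def get_static_shape(default_shapes, changed_values, layout, dims_to_change):
--     cv = dict(changed_values)
--     result = {}
--     for layer, defaults in default_shapes.items():
--         dims = dims_to_change.get(layer)
--         if dims is None:
--             result[layer] = list(defaults)
--         else:
--             overrides = {layout[layer].index(d): v
--                          for d, v in zip(dims, cv[layer])}
--             result[layer] = [dv if overrides.get(i) is None else overrides[i]
--                              for i, dv in enumerate(defaults)]
--     return result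
-- ===== Notes on version B (the rewrite author's own statement) =====
-- stated objective: alternative
-- what changed: A deep-copies the defaults and scatters in-place element writes into the shared dict while iterating dims_to_change; B iterates default_shapes and rebuilds each layer's shape functionally in one pass from an index->value override table built from zip(dims, changed_values[layer]).
import Mathlib
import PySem

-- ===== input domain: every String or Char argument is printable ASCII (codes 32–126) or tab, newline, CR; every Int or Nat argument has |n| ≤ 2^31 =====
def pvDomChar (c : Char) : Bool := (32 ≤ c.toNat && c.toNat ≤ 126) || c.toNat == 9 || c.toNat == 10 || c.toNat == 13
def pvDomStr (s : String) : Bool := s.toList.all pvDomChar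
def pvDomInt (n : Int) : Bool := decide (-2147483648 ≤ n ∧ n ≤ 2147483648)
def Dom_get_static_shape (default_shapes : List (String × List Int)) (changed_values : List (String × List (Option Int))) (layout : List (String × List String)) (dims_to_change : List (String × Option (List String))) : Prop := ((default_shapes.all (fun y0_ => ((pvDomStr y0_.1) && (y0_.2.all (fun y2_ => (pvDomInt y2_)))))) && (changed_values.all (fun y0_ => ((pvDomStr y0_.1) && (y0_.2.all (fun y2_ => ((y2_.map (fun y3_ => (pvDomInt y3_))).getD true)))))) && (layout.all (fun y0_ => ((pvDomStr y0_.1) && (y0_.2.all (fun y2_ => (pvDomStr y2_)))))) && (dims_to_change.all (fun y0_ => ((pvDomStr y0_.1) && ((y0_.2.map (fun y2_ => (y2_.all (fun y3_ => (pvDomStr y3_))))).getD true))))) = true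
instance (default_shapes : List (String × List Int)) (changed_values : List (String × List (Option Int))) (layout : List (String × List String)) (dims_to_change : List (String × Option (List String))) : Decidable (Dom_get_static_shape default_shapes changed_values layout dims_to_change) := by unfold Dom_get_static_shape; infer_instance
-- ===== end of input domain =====

-- ===== PORT A =====
-- B rebuilds each shape functionally from an override table; A scatters writes into a dict in place (objective: alternative).
-- Shared dict-lookup helper: d[k] on an association list (first match), with a default for the total Lean function.
def pvLookupD {α : Type} (l : List (String × α)) (k : String) (d : α) : α :=
  match l.find? (fun p => p.1 == k) with
  | some p => p.2
  | none => d

-- static_shapes[input_layer][idx] = v   (one dict-entry write)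
def pvASet (layer : String) (idx : Nat) (v : Int) (ss : List (String × List Int)) : List (String × List Int) :=
  ss.map (fun p => if p.1 == layer then (p.1, p.2.set idx v) else p)

-- the body of A's outer loop for one (input_layer, dimension) item of dims_to_change
def pvAEntry (default_shapes : List (String × List Int)) (changed_values : List (String × List (Option Int)))
    (layout : List (String × List String)) (ss : List (String × List Int))
    (e : String × Option (List String)) : List (String × List Int) :=
  match e.2 with
  | none => ss
  | some dimension =>
    let layer := e.1
    let dim_indexes : List Nat :=
      dimension.map (fun d => (PySem.List.index? (pvLookupD layout layer []) d).getD 0)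
    (PySem.List.enumerate (pvLookupD changed_values layer []) 0).foldl
      (fun ss vi =>
        let idx : Nat := PySem.List.pyGetD dim_indexes vi.1 0
        let v : Int := match vi.2 with
          | none => PySem.List.pyGetD (pvLookupD default_shapes layer []) (idx : Int) 0
          | some v => v
        pvASet layer idx v ss) ss

def get_static_shape (default_shapes : List (String × List Int)) (changed_values : List (String × List (Option Int))) (layout : List (String × List String)) (dims_to_change : List (String × Option (List String))) : List (String × List Int) :=
  dims_to_change.foldl (pvAEntry default_shapes changed_values layout) default_shapes

-- ===== PORT B =====
-- one result layer: override table index→value from zip(dims, cv[layer]), then a functional rebuild of the shape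
def pvBLayer (changed_values : List (String × List (Option Int))) (layout : List (String × List String))
    (dims_to_change : List (String × Option (List String))) (p : String × List Int) : String × List Int :=
  match pvLookupD dims_to_change p.1 none with
  | none => (p.1, p.2)
  | some dims =>
    let layl := pvLookupD layout p.1 []
    let overrides : PySem.Dict Int (Option Int) :=
      ((dims.zip (pvLookupD changed_values p.1 [])).map
          (fun dv => ((((PySem.List.index? layl dv.1).getD 0 : Nat) : Int), dv.2))).foldl
        (fun d kv => d.insert kv.1 kv.2) PySem.Dict.empty
    (p.1, (PySem.List.enumerate p.2 0).map (fun iv =>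
      match overrides.get? iv.1 with
      | some (some v) => v
      | _ => iv.2))

def get_static_shape_alt (default_shapes : List (String × List Int)) (changed_values : List (String × List (Option Int))) (layout : List (String × List String)) (dims_to_change : List (String × Option (List String))) : List (String × List Int) :=
  default_shapes.map (pvBLayer changed_values layout dims_to_change)

-- ===== PRECONDITION & SPEC =====
-- per-item no-raise condition for A: every named dim is in the layer's layout (KeyError/ValueError),
-- the layer is a key of changed_values (KeyError), changed_values[layer] is no longer than
-- dimension (IndexError on dim_indexes), and every written index is inside the layer's default shape
-- (KeyError on static_shapes[layer] / IndexError on the element assignment).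
def pvPreEntry (default_shapes : List (String × List Int)) (changed_values : List (String × List (Option Int)))
    (layout : List (String × List String)) (e : String × Option (List String)) : Bool :=
  match e.2 with
  | none => true
  | some dims =>
    let layl := pvLookupD layout e.1 []
    let cvl := pvLookupD changed_values e.1 []
    let dsl := pvLookupD default_shapes e.1 []
    dims.all (fun d => layl.contains d) &&
    (changed_values.map (fun p => p.1)).contains e.1 &&
    decide (cvl.length ≤ dims.length) &&
    (dims.zip cvl).all (fun dv => decide ((PySem.List.index? layl dv.1).getD 0 < dsl.length))

-- Pre_: exactly the inputs where A raises no exception; the Nodup conjuncts only say that the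
-- association lists really encode Python dicts (unique keys), which is true of every dict input.
def Pre_get_static_shape (default_shapes : List (String × List Int)) (changed_values : List (String × List (Option Int))) (layout : List (String × List String)) (dims_to_change : List (String × Option (List String))) : Prop :=
  (default_shapes.map (fun p => p.1)).Nodup ∧ (changed_values.map (fun p => p.1)).Nodup ∧
  (layout.map (fun p => p.1)).Nodup ∧ (dims_to_change.map (fun p => p.1)).Nodup ∧
  dims_to_change.all (pvPreEntry default_shapes changed_values layout) = true

instance (default_shapes : List (String × List Int)) (changed_values : List (String × List (Option Int))) (layout : List (String × List String)) (dims_to_change : List (String × Option (List String))) : Decidable (Pre_get_static_shape default_shapes changed_values layout dims_to_change) := by unfold Pre_get_static_shape; infer_instance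

def pvWitness_get_static_shape : (List (String × List Int)) × (List (String × List (Option Int))) × (List (String × List String)) × (List (String × Option (List String))) :=
  ([("x", [1, 2]), ("y", [3])], [("x", [some 7])], [("x", ["a", "b"])], [("x", some ["b"]), ("y", none)])

def Spec_get_static_shape (default_shapes : List (String × List Int)) (changed_values : List (String × List (Option Int))) (layout : List (String × List String)) (dims_to_change : List (String × Option (List String))) (out : List (String × List Int)) : Prop := out = get_static_shape_alt default_shapes changed_values layout dims_to_change
instance (default_shapes : List (String × List Int)) (changed_values : List (String × List (Option Int))) (layout : List (String × List String)) (dims_to_change : List (String × Option (List String))) (out : List (String × List Int)) : Decidable (Spec_get_static_shape default_shapes changed_values layout dims_to_change out) := by unfold Spec_get_static_shape; infer_instance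

-- ===== CLAIM (what is proved, stated in full; the proofs are below) =====
def Claim_equal_get_static_shape : Prop := ∀ (default_shapes : List (String × List Int)) (changed_values : List (String × List (Option Int))) (layout : List (String × List String)) (dims_to_change : List (String × Option (List String))), Dom_get_static_shape default_shapes changed_values layout dims_to_change → Pre_get_static_shape default_shapes changed_values layout dims_to_change → Spec_get_static_shape default_shapes changed_values layout dims_to_change (get_static_shape default_shapes changed_values layout dims_to_change)

-- ===== LEMMAS AND PROOFS =====

-- A's per-layer write loop, acting on one shape (the value of one dict entry)
def pvWr (default_shapes : List (String × List Int)) (changed_values : List (String × List (Option Int)))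
    (layout : List (String × List String)) (layer : String) (dims : List String) (shape : List Int) : List Int :=
  let dim_indexes : List Nat :=
    dims.map (fun d => (PySem.List.index? (pvLookupD layout layer []) d).getD 0)
  (PySem.List.enumerate (pvLookupD changed_values layer []) 0).foldl
    (fun sh vi =>
      let idx : Nat := PySem.List.pyGetD dim_indexes vi.1 0
      let v : Int := match vi.2 with
        | none => PySem.List.pyGetD (pvLookupD default_shapes layer []) (idx : Int) 0
        | some v => v
      sh.set idx v) shape

-- A's outer-loop body as a function on one dict entry
def pvEntryFun (default_shapes : List (String × List Int)) (changed_values : List (String × List (Option Int)))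
    (layout : List (String × List String)) (e : String × Option (List String))
    (q : String × List Int) : String × List Int :=
  match e.2 with
  | none => q
  | some dims => if q.1 == e.1 then (q.1, pvWr default_shapes changed_values layout e.1 dims q.2) else q

theorem pvFoldMap {α β : Type} (l : List β) (f : β → α → α) (ss : List α) :
    l.foldl (fun ss e => ss.map (f e)) ss = ss.map (fun p => l.foldl (fun q e => f e q) p) := by
  induction l generalizing ss with
  | nil => simp
  | cons e t ih =>
    simp only [List.foldl_cons, ih, List.map_map]
    rfl

theorem pvHoist {β : Type} (layer : String) (h : β → List Int → List Int) (l : List β)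
    (q : String × List Int) :
    l.foldl (fun q x => if q.1 == layer then (q.1, h x q.2) else q) q
      = if q.1 == layer then (q.1, l.foldl (fun s x => h x s) q.2) else q := by
  induction l generalizing q with
  | nil => split <;> simp
  | cons x t ih =>
    rw [List.foldl_cons]
    by_cases hb : (q.1 == layer) = true
    · rw [if_pos hb, ih]
      have hb2 : (((q.1, h x q.2) : String × List Int).1 == layer) = true := hb
      rw [if_pos hb2, if_pos hb, List.foldl_cons]
    · rw [if_neg hb, ih, if_neg hb, if_neg hb]

theorem pvAEntry_eq_map (default_shapes : List (String × List Int)) (changed_values : List (String × List (Option Int)))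
    (layout : List (String × List String)) (ss : List (String × List Int)) (e : String × Option (List String)) :
    pvAEntry default_shapes changed_values layout ss e
      = ss.map (pvEntryFun default_shapes changed_values layout e) := by
  obtain ⟨k, od⟩ := e
  cases od with
  | none =>
    have h : pvEntryFun default_shapes changed_values layout (k, none) = id := by
      funext q; rfl
    simp [pvAEntry, h]
  | some dims =>
    simp only [pvAEntry, pvASet]
    rw [pvFoldMap]
    refine congrArg (fun f => List.map f ss) (funext fun p => ?_)
    simp only [pvEntryFun, pvWr]
    exact pvHoist k (fun (vi : Int × Option Int) s => s.set
      (PySem.List.pyGetD (dims.map (fun d => (PySem.List.index? (pvLookupD layout k []) d).getD 0)) vi.1 0)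
      (match vi.2 with
        | none => PySem.List.pyGetD (pvLookupD default_shapes k [])
            ((PySem.List.pyGetD (dims.map (fun d => (PySem.List.index? (pvLookupD layout k []) d).getD 0)) vi.1 0 : Nat) : Int) 0
        | some v => v)) _ p

theorem pvA_eq_map (default_shapes : List (String × List Int)) (changed_values : List (String × List (Option Int)))
    (layout : List (String × List String)) (dims_to_change : List (String × Option (List String))) :
    get_static_shape default_shapes changed_values layout dims_to_change
      = default_shapes.map (fun p =>
          dims_to_change.foldl (fun q e => pvEntryFun default_shapes changed_values layout e q) p) := by
  unfold get_static_shape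
  rw [show pvAEntry default_shapes changed_values layout
        = (fun ss e => ss.map (pvEntryFun default_shapes changed_values layout e)) from
      funext fun ss => funext fun e => pvAEntry_eq_map _ _ _ ss e]
  exact pvFoldMap _ _ _

theorem pvSkip (default_shapes : List (String × List Int)) (changed_values : List (String × List (Option Int)))
    (layout : List (String × List String)) (l : List (String × Option (List String)))
    (q : String × List Int) (h : ∀ e ∈ l, e.1 ≠ q.1) :
    l.foldl (fun q e => pvEntryFun default_shapes changed_values layout e q) q = q := by
  induction l with
  | nil => rfl
  | cons e t ih =>
    have he : e.1 ≠ q.1 := h e (List.mem_cons_self)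
    have hb : (q.1 == e.1) = false := by simp [Ne.symm he]
    have hstep : pvEntryFun default_shapes changed_values layout e q = q := by
      cases hod : e.2 with
      | none => simp [pvEntryFun, hod]
      | some dims => simp [pvEntryFun, hod, hb]
    simp only [List.foldl_cons, hstep]
    exact ih (fun e' he' => h e' (List.mem_cons_of_mem _ he'))

theorem pvFold_find (default_shapes : List (String × List Int)) (changed_values : List (String × List (Option Int)))
    (layout : List (String × List String)) (dtc : List (String × Option (List String)))
    (hnd : (dtc.map (fun p => p.1)).Nodup) (q : String × List Int) :
    dtc.foldl (fun q e => pvEntryFun default_shapes changed_values layout e q) q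
      = match dtc.find? (fun e => e.1 == q.1) with
        | some (_, some dims) => (q.1, pvWr default_shapes changed_values layout q.1 dims q.2)
        | _ => q := by
  induction dtc generalizing q with
  | nil => rfl
  | cons e t ih =>
    obtain ⟨k0, od⟩ := e
    simp only [List.map_cons, List.nodup_cons] at hnd
    obtain ⟨hnotin, hndt⟩ := hnd
    by_cases hb : k0 = q.1
    · have hpred : ((k0, od).1 == q.1) = true := by simp [hb]
      have hskip : ∀ e' ∈ t, e'.1 ≠ q.1 := by
        intro e' he' hc
        exact hnotin (by rw [hb]; rw [← hc]; exact List.mem_map_of_mem he')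
      cases od with
      | none =>
        have hstep : pvEntryFun default_shapes changed_values layout (k0, none) q = q := rfl
        simp only [List.foldl_cons, hstep, List.find?_cons, hpred]
        rw [pvSkip _ _ _ t q hskip]
      | some dims =>
        have hstep : pvEntryFun default_shapes changed_values layout (k0, some dims) q
            = (q.1, pvWr default_shapes changed_values layout q.1 dims q.2) := by
          simp [pvEntryFun, hb]
        simp only [List.foldl_cons, hstep, List.find?_cons, hpred]
        exact pvSkip _ _ _ t _ (by intro e' he'; exact hskip e' he')
    · have hpred : ((k0, od).1 == q.1) = false := by simp [hb]
      have hb' : (q.1 == k0) = false := by simp [Ne.symm hb]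
      have hstep : pvEntryFun default_shapes changed_values layout (k0, od) q = q := by
        cases od with
        | none => rfl
        | some dims => simp [pvEntryFun, hb']
      simp only [List.foldl_cons, hstep, List.find?_cons, hpred]
      exact ih hndt q

theorem pvLookupD_of_mem {α : Type} (l : List (String × α)) (hnd : (l.map (fun p => p.1)).Nodup)
    (p : String × α) (hp : p ∈ l) (d : α) : pvLookupD l p.1 d = p.2 := by
  induction l with
  | nil => cases hp
  | cons x t ih =>
    simp only [List.map_cons, List.nodup_cons] at hnd
    obtain ⟨hnotin, hndt⟩ := hnd
    rcases List.mem_cons.mp hp with rfl | hpt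
    · simp [pvLookupD]
    · have hx : (x.1 == p.1) = false := by
        have : x.1 ≠ p.1 := fun hc => hnotin (hc ▸ List.mem_map_of_mem hpt)
        simp [this]
      simp only [pvLookupD, List.find?_cons, hx]
      exact ih hndt hpt

theorem pvSetFold_length (ws : List (Nat × Int)) (s : List Int) :
    (ws.foldl (fun sh w => sh.set w.1 w.2) s).length = s.length := by
  induction ws generalizing s with
  | nil => rfl
  | cons w t ih => simp [List.foldl_cons, ih]

theorem pvSetFold_getElem (ws : List (Nat × Int)) (s : List Int) (i : Nat) (hi : i < s.length)
    (hw : ∀ w ∈ ws, w.1 < s.length) :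
    (ws.foldl (fun sh w => sh.set w.1 w.2) s)[i]'(by rw [pvSetFold_length]; exact hi)
      = match ws.reverse.find? (fun w => w.1 == i) with
        | some w => w.2
        | none => s[i] := by
  induction ws generalizing s with
  | nil => rfl
  | cons w t ih =>
    have hlen : (s.set w.1 w.2).length = s.length := by simp
    have hwt : ∀ w' ∈ t, w'.1 < (s.set w.1 w.2).length := by
      intro w' hw'; rw [hlen]; exact hw w' (List.mem_cons_of_mem _ hw')
    have hi' : i < (s.set w.1 w.2).length := by rw [hlen]; exact hi
    simp only [List.foldl_cons]
    rw [ih (s.set w.1 w.2) hi' hwt]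
    simp only [List.reverse_cons, List.find?_append]
    cases hf : t.reverse.find? (fun w => w.1 == i) with
    | some u => simp
    | none =>
      simp only [Option.none_or]
      cases hww : ((w.1 == i) : Bool) with
      | true =>
        have heq : w.1 = i := by simpa using hww
        simp [heq]
      | false =>
        have hne : ¬ (w.1 = i) := by simpa using hww
        simp [hww, hne]

theorem pvGetFoldInsert (l : List (Int × Option Int)) (d : PySem.Dict Int (Option Int)) (k : Int) :
    (l.foldl (fun d kv => d.insert kv.1 kv.2) d).get? k
      = match l.reverse.find? (fun kv => kv.1 == k) with
        | some kv => some kv.2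
        | none => d.get? k := by
  induction l generalizing d with
  | nil => rfl
  | cons w t ih =>
    simp only [List.foldl_cons]
    rw [ih]
    simp only [List.reverse_cons, List.find?_append]
    cases hf : t.reverse.find? (fun kv => kv.1 == k) with
    | some u => simp
    | none =>
      simp only [Option.none_or]
      cases hww : ((w.1 == k) : Bool) with
      | true =>
        have hkw : k = w.1 := ((beq_iff_eq).mp hww).symm
        simp [hkw]
      | false =>
        have hkw : ¬ (k = w.1) := fun hc => by rw [hc] at hww; simp at hww
        simp [hww, PySem.Dict.get?_insert, hkw]

theorem pvFoldPair {β : Type} (l : List β) (F : β → Nat) (V : β → Int) (s : List Int) :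
    l.foldl (fun sh vi => sh.set (F vi) (V vi)) s
      = (l.map (fun vi => (F vi, V vi))).foldl (fun sh w => sh.set w.1 w.2) s := by
  induction l generalizing s with
  | nil => rfl
  | cons x t ih => simp only [List.foldl_cons, List.map_cons, ih]

theorem pvEnumZip (dims : List String) (cvl : List (Option Int)) (g : String → Nat)
    (hle : cvl.length ≤ dims.length) (F : Nat → Option Int → (Nat × Int)) :
    (PySem.List.enumerate cvl 0).map (fun vi => F (PySem.List.pyGetD (dims.map g) vi.1 0) vi.2)
      = (dims.zip cvl).map (fun dv => F (g dv.1) dv.2) := by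
  apply List.ext_getElem
  · simp only [List.length_map, PySem.List.length_enumerate, List.length_zip]
    omega
  · intro j h1 h2
    have hj : j < cvl.length := by
      simpa [PySem.List.length_enumerate] using h1
    have hjd : j < dims.length := lt_of_lt_of_le hj hle
    simp only [List.getElem_map, PySem.List.getElem_enumerate, List.getElem_zip]
    rw [show ((0 : Int) + (j : Nat)) = ((j : Nat) : Int) by omega]
    rw [PySem.List.pyGetD_natCast]
    rw [List.getD_eq_getElem _ _ (by simpa using hjd)]
    simp

theorem pvLayerCore (default_shapes : List (String × List Int)) (changed_values : List (String × List (Option Int)))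
    (layout : List (String × List String)) (k : String) (dims : List String) (s : List Int)
    (hs : pvLookupD default_shapes k [] = s)
    (hle : (pvLookupD changed_values k []).length ≤ dims.length)
    (hz : ∀ dv ∈ dims.zip (pvLookupD changed_values k []),
        (PySem.List.index? (pvLookupD layout k []) dv.1).getD 0 < s.length) :
    pvWr default_shapes changed_values layout k dims s
      = (PySem.List.enumerate s 0).map (fun iv =>
          match (((dims.zip (pvLookupD changed_values k [])).map
              (fun dv => ((((PySem.List.index? (pvLookupD layout k []) dv.1).getD 0 : Nat) : Int), dv.2))).foldl
              (fun d kv => d.insert kv.1 kv.2) PySem.Dict.empty).get? iv.1 with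
          | some (some v) => v
          | _ => iv.2) := by
  have hfold : pvWr default_shapes changed_values layout k dims s
      = ((dims.zip (pvLookupD changed_values k [])).map (fun dv =>
            ((PySem.List.index? (pvLookupD layout k []) dv.1).getD 0,
             (match dv.2 with
              | none => PySem.List.pyGetD s
                  (((PySem.List.index? (pvLookupD layout k []) dv.1).getD 0 : Nat) : Int) 0
              | some v => v : Int)))).foldl (fun sh w => sh.set w.1 w.2) s := by
    simp only [pvWr, hs]
    rw [pvFoldPair]
    rw [pvEnumZip dims (pvLookupD changed_values k [])
        (fun d => (PySem.List.index? (pvLookupD layout k []) d).getD 0) hle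
        (fun idx ov => (idx, (match ov with
          | none => PySem.List.pyGetD s ((idx : Nat) : Int) 0
          | some v => v : Int)))]
  rw [hfold]
  apply List.ext_getElem
  · simp only [pvSetFold_length, List.length_map, PySem.List.length_enumerate]
  · intro i h1 h2
    have hi : i < s.length := by simpa [pvSetFold_length] using h1
    have hw : ∀ w ∈ (dims.zip (pvLookupD changed_values k [])).map (fun dv =>
          ((PySem.List.index? (pvLookupD layout k []) dv.1).getD 0,
           (match dv.2 with
            | none => PySem.List.pyGetD s
                (((PySem.List.index? (pvLookupD layout k []) dv.1).getD 0 : Nat) : Int) 0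
            | some v => v : Int))), w.1 < s.length := by
      intro w hwm
      obtain ⟨dv, hdv, rfl⟩ := List.mem_map.mp hwm
      exact hz dv hdv
    rw [pvSetFold_getElem _ s i hi hw]
    simp only [List.getElem_map, PySem.List.getElem_enumerate]
    rw [pvGetFoldInsert]
    rw [show ((0 : Int) + (i : Nat)) = ((i : Nat) : Int) by omega]
    rw [← List.map_reverse, ← List.map_reverse, List.find?_map, List.find?_map]
    have hpred1 : (fun (w : Nat × Int) => w.1 == i) ∘ (fun dv =>
          ((PySem.List.index? (pvLookupD layout k []) dv.1).getD 0,
           (match dv.2 with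
            | none => PySem.List.pyGetD s
                (((PySem.List.index? (pvLookupD layout k []) dv.1).getD 0 : Nat) : Int) 0
            | some v => v : Int)))
        = (fun (dv : String × Option Int) => (PySem.List.index? (pvLookupD layout k []) dv.1).getD 0 == i) := by
      funext dv; rfl
    have hpred2 : (fun (kv : Int × Option Int) => kv.1 == (i : Int)) ∘ (fun dv =>
          ((((PySem.List.index? (pvLookupD layout k []) dv.1).getD 0 : Nat) : Int), dv.2))
        = (fun (dv : String × Option Int) => (PySem.List.index? (pvLookupD layout k []) dv.1).getD 0 == i) := by
      funext dv
      simp [Function.comp]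
    rw [hpred1, hpred2]
    cases hf : (dims.zip (pvLookupD changed_values k [])).reverse.find?
        (fun dv => (PySem.List.index? (pvLookupD layout k []) dv.1).getD 0 == i) with
    | none => simp
    | some dv0 =>
      have hgi : (PySem.List.index? (pvLookupD layout k []) dv0.1).getD 0 = i := by
        have := List.find?_some hf
        simpa using this
      obtain ⟨d0, ov0⟩ := dv0
      cases ov0 with
      | some v => simp
      | none =>
        simp only [Option.map_some]
        simp only [hgi] at *
        rw [PySem.List.pyGetD_natCast]
        rw [List.getD_eq_getElem _ _ hi]

theorem pv_main (default_shapes : List (String × List Int)) (changed_values : List (String × List (Option Int)))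
    (layout : List (String × List String)) (dims_to_change : List (String × Option (List String)))
    (hpre : Pre_get_static_shape default_shapes changed_values layout dims_to_change) :
    get_static_shape default_shapes changed_values layout dims_to_change
      = get_static_shape_alt default_shapes changed_values layout dims_to_change := by
  obtain ⟨hnd1, hnd2, hnd3, hnd4, hall⟩ := hpre
  rw [pvA_eq_map]
  unfold get_static_shape_alt
  refine List.map_congr_left (fun p hp => ?_)
  rw [pvFold_find _ _ _ _ hnd4 p]
  have hlookup : pvLookupD dims_to_change p.1 none
      = match dims_to_change.find? (fun e => e.1 == p.1) with
        | some e => e.2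
        | none => none := by
    cases hf : dims_to_change.find? (fun e => e.1 == p.1) <;> simp [pvLookupD, hf]
  cases hfind : dims_to_change.find? (fun e => e.1 == p.1) with
  | none =>
    simp only [pvBLayer, hlookup, hfind]
  | some e =>
    obtain ⟨k0, od⟩ := e
    have he1 : k0 = p.1 := by
      have := List.find?_some hfind
      simpa using this
    have hemem : (k0, od) ∈ dims_to_change := List.mem_of_find?_eq_some hfind
    cases od with
    | none =>
      simp only [pvBLayer, hlookup, hfind]
    | some dims =>
      have hpe : pvPreEntry default_shapes changed_values layout (k0, some dims) = true :=
        List.all_eq_true.mp hall _ hemem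
      simp only [pvPreEntry, Bool.and_eq_true, List.all_eq_true, decide_eq_true_eq] at hpe
      obtain ⟨⟨⟨_hdims, _hcv⟩, hle⟩, hz⟩ := hpe
      have hs : pvLookupD default_shapes p.1 [] = p.2 := pvLookupD_of_mem _ hnd1 p hp []
      rw [he1] at hle hz
      simp only [pvBLayer, hlookup, hfind]
      rw [pvLayerCore default_shapes changed_values layout p.1 dims p.2 hs hle
        (by intro dv hdv; rw [← hs]; exact hz dv hdv)]

-- ===== VERDICT (by name: the statement is the Claim_ definition above) =====
theorem get_static_shape_spec : Claim_equal_get_static_shape := by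
  intro default_shapes changed_values layout dims_to_change _hdom hpre
  unfold Spec_get_static_shape
  exact pv_main default_shapes changed_values layout dims_to_change hpre
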